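-- pv_equiv track=rewrite | github.com/g-s01/data-programming-btp | gautam-results-and-analysis/raw-to-fine-direct/through-lfs/context-window-one/lfs_for_raw_sentence_gpt.py | label_sentence_Person_Group
-- ===== SOURCE A (Python) =====
-- ABSTAIN = -1
--
-- Person_OtherPER = 1
--
-- Person_Artist = 2
--
-- Group_SportsGRP = 3
--
-- Person_Athlete = 4
--
-- Group_ORG = 5
--
-- Group_PublicCorp = 9
--
-- Person_Politician = 14
--
-- Person_Scientist = 20
--
-- Person_SportsManager = 21
--
-- Group_MusicalGroup = 22
--
-- Person_Cleric = 25
--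
-- Group_CarManufacturer = 28
--
-- Group_AeroSpaceManufacturer = 30
--
-- Group_PrivateCorp = 33
--
-- def label_sentence_Person_Group(tokens):
--     """
--     Labels each token in a sentence with a fine-grained label based on context.
--     Returns a list of fine-grained labels for each token.
--
--     Args:
--     tokens: list of str - A list of words representing a sentence.
--
--     Returns:
--     list of str - A list of fine-grained labels for each token.
--     """
--     # Define fine-grained context for Person and Group
--     fine_label_context = {
--         # Person subtypes
--         Person_Scientist: {'curie', 'einstein', 'darwin', 'murray'},
--         Person_Artist: {'composer', 'painter', 'sculptor', 'poet', 'writer', 'drummer', 'singer', 'actor', 'jihyo', 'sharpe'},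
--         Person_Athlete: {'player', 'athlete', 'runner', 'gymnast'},
--         Person_Politician: {'senator', 'president', 'minister', 'leader'},
--         Person_Cleric: {'priest', 'imam', 'bishop', 'monk'},
--         Person_SportsManager: {'coach', 'trainer', 'manager'},
--         Person_OtherPER: {'author', 'historian', 'philosopher', 'founder', 'chairman', 'executive', 'charles', 'koch', 'tom', 'dennis', 'deyoung'},
--
--         # Group subtypes
--         Group_PublicCorp: {'corporation', 'inc', 'ltd', 'plc'},
--         Group_PrivateCorp: {'koch', 'industries'},
--         Group_AeroSpaceManufacturer: {'boeing', 'airbus', 'lockheed'},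
--         Group_SportsGRP: {'team', 'club', 'association'},
--         Group_CarManufacturer: {'toyota', 'ford', 'mercedes'},
--         Group_ORG: {'organization', 'agency', 'foundation'},
--         Group_MusicalGroup: {'band', 'orchestra', 'choir', 'twice', 'steamroller'},
--     }
--
--     labels = []
--
--     for token in tokens:
--         token_lower = token.lower()
--         fine_label = ABSTAIN
--
--         for label, keywords in fine_label_context.items():
--             if token_lower in keywords:
--                 fine_label = label
--                 break
--
--         labels.append(fine_label)
--
--     return labels
-- ===== SOURCE B (Python) =====
-- ABSTAIN = -1
--
-- Person_OtherPER = 1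
-- Person_Artist = 2
-- Group_SportsGRP = 3
-- Person_Athlete = 4
-- Group_ORG = 5
-- Group_PublicCorp = 9
-- Person_Politician = 14
-- Person_Scientist = 20
-- Person_SportsManager = 21
-- Group_MusicalGroup = 22
-- Person_Cleric = 25
-- Group_CarManufacturer = 28
-- Group_AeroSpaceManufacturer = 30
-- Group_PrivateCorp = 33
--
-- # Precomputed flat keyword -> label table (each keyword once; 'koch' stays with
-- # Person_OtherPER, the first-listed category, matching the original's first-match break).
-- KEYWORD_LABEL = {
--     'curie': Person_Scientist, 'einstein': Person_Scientist, 'darwin': Person_Scientist, 'murray': Person_Scientist,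
--     'composer': Person_Artist, 'painter': Person_Artist, 'sculptor': Person_Artist, 'poet': Person_Artist,
--     'writer': Person_Artist, 'drummer': Person_Artist, 'singer': Person_Artist, 'actor': Person_Artist,
--     'jihyo': Person_Artist, 'sharpe': Person_Artist,
--     'player': Person_Athlete, 'athlete': Person_Athlete, 'runner': Person_Athlete, 'gymnast': Person_Athlete,
--     'senator': Person_Politician, 'president': Person_Politician, 'minister': Person_Politician, 'leader': Person_Politician,
--     'priest': Person_Cleric, 'imam': Person_Cleric, 'bishop': Person_Cleric, 'monk': Person_Cleric,
--     'coach': Person_SportsManager, 'trainer': Person_SportsManager, 'manager': Person_SportsManager,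
--     'author': Person_OtherPER, 'historian': Person_OtherPER, 'philosopher': Person_OtherPER, 'founder': Person_OtherPER,
--     'chairman': Person_OtherPER, 'executive': Person_OtherPER, 'charles': Person_OtherPER, 'koch': Person_OtherPER,
--     'tom': Person_OtherPER, 'dennis': Person_OtherPER, 'deyoung': Person_OtherPER,
--     'corporation': Group_PublicCorp, 'inc': Group_PublicCorp, 'ltd': Group_PublicCorp, 'plc': Group_PublicCorp,
--     'industries': Group_PrivateCorp,
--     'boeing': Group_AeroSpaceManufacturer, 'airbus': Group_AeroSpaceManufacturer, 'lockheed': Group_AeroSpaceManufacturer,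
--     'team': Group_SportsGRP, 'club': Group_SportsGRP, 'association': Group_SportsGRP,
--     'toyota': Group_CarManufacturer, 'ford': Group_CarManufacturer, 'mercedes': Group_CarManufacturer,
--     'organization': Group_ORG, 'agency': Group_ORG, 'foundation': Group_ORG,
--     'band': Group_MusicalGroup, 'orchestra': Group_MusicalGroup, 'choir': Group_MusicalGroup,
--     'twice': Group_MusicalGroup, 'steamroller': Group_MusicalGroup,
-- }
--
--
-- def label_sentence_Person_Group(tokens):
--     return [KEYWORD_LABEL.get(token.lower(), ABSTAIN) for token in tokens]
-- ===== Notes on version B (the rewrite author's own statement) =====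
-- stated objective: faster
-- what changed: A scans the category->keyword-set mapping for every token with a first-match break; B replaces that inner scan by a flat precomputed keyword->label dict (each keyword once, 'koch' kept with its first-listed category) and labels each token with a single dict lookup.
import Mathlib
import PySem

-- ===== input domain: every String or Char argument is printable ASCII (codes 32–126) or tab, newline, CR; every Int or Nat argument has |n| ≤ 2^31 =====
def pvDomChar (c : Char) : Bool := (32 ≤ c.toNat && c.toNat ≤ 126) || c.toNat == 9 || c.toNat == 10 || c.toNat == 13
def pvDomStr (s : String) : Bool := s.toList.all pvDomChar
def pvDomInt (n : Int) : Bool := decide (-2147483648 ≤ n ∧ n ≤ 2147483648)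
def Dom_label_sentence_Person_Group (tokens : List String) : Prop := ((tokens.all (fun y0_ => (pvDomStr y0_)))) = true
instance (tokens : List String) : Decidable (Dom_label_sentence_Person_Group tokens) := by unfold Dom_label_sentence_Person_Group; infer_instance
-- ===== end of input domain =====

-- B replaces A's per-token scan over the category→keyword-set mapping (first match, break)
-- by a flat precomputed keyword→label dict ('koch' once, with its first-listed category)
-- and a single lookup per token.

-- ===== PORT A =====
-- A's category → keyword-set dict, in source order.
def pvCtx : List (Int × PySem.Set String) := [
  (20, PySem.Set.ofList ["curie", "einstein", "darwin", "murray"]),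
  (2,  PySem.Set.ofList ["composer", "painter", "sculptor", "poet", "writer", "drummer", "singer", "actor", "jihyo", "sharpe"]),
  (4,  PySem.Set.ofList ["player", "athlete", "runner", "gymnast"]),
  (14, PySem.Set.ofList ["senator", "president", "minister", "leader"]),
  (25, PySem.Set.ofList ["priest", "imam", "bishop", "monk"]),
  (21, PySem.Set.ofList ["coach", "trainer", "manager"]),
  (1,  PySem.Set.ofList ["author", "historian", "philosopher", "founder", "chairman", "executive", "charles", "koch", "tom", "dennis", "deyoung"]),
  (9,  PySem.Set.ofList ["corporation", "inc", "ltd", "plc"]),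
  (33, PySem.Set.ofList ["koch", "industries"]),
  (30, PySem.Set.ofList ["boeing", "airbus", "lockheed"]),
  (3,  PySem.Set.ofList ["team", "club", "association"]),
  (28, PySem.Set.ofList ["toyota", "ford", "mercedes"]),
  (5,  PySem.Set.ofList ["organization", "agency", "foundation"]),
  (22, PySem.Set.ofList ["band", "orchestra", "choir", "twice", "steamroller"])]

-- the inner 'for label, keywords in …: if token_lower in keywords: fine_label = label; break'
def pvFirstMatch (tok : String) : List (Int × PySem.Set String) → Int
  | [] => -1
  | (label, kws) :: rest =>
      if PySem.Set.contains kws tok then label else pvFirstMatch tok rest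

def label_sentence_Person_Group (tokens : List String) : List Int :=
  tokens.foldl (fun labels token =>
    labels ++ [pvFirstMatch (PySem.Str.lower token) pvCtx]) []

-- ===== PORT B =====
-- B's flat dict literal KEYWORD_LABEL.
def pvTable : PySem.Dict String Int := PySem.Dict.ofList [
  ("curie", 20), ("einstein", 20), ("darwin", 20), ("murray", 20),
  ("composer", 2), ("painter", 2), ("sculptor", 2), ("poet", 2),
  ("writer", 2), ("drummer", 2), ("singer", 2), ("actor", 2),
  ("jihyo", 2), ("sharpe", 2),
  ("player", 4), ("athlete", 4), ("runner", 4), ("gymnast", 4),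
  ("senator", 14), ("president", 14), ("minister", 14), ("leader", 14),
  ("priest", 25), ("imam", 25), ("bishop", 25), ("monk", 25),
  ("coach", 21), ("trainer", 21), ("manager", 21),
  ("author", 1), ("historian", 1), ("philosopher", 1), ("founder", 1),
  ("chairman", 1), ("executive", 1), ("charles", 1), ("koch", 1),
  ("tom", 1), ("dennis", 1), ("deyoung", 1),
  ("corporation", 9), ("inc", 9), ("ltd", 9), ("plc", 9),
  ("industries", 33),
  ("boeing", 30), ("airbus", 30), ("lockheed", 30),
  ("team", 3), ("club", 3), ("association", 3),
  ("toyota", 28), ("ford", 28), ("mercedes", 28),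
  ("organization", 5), ("agency", 5), ("foundation", 5),
  ("band", 22), ("orchestra", 22), ("choir", 22),
  ("twice", 22), ("steamroller", 22)]

def label_sentence_Person_Group_alt (tokens : List String) : List Int :=
  tokens.map (fun token => pvTable.getD (PySem.Str.lower token) (-1))

-- ===== PRECONDITION & SPEC =====
def Spec_label_sentence_Person_Group (tokens : List String) (out : List Int) : Prop := out = label_sentence_Person_Group_alt tokens
instance (tokens : List String) (out : List Int) : Decidable (Spec_label_sentence_Person_Group tokens out) := by unfold Spec_label_sentence_Person_Group; infer_instance

-- ===== CLAIM (what is proved, stated in full; the proofs are below) =====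
def Claim_equal_label_sentence_Person_Group : Prop := ∀ (tokens : List String), Dom_label_sentence_Person_Group tokens → Spec_label_sentence_Person_Group tokens (label_sentence_Person_Group tokens)

-- ===== LEMMAS AND PROOFS =====

-- flatten a context list into (keyword, label) pairs, category order
def pvFlat (ctx : List (Int × PySem.Set String)) : List (String × Int) :=
  ctx.flatMap (fun p => p.2.map (fun kw => (kw, p.1)))

-- first-match lookup in a raw pair list (= Dict.mk's get?)
theorem get?_mk_block (kws : List String) (lab : Int) (rest : List (String × Int)) (tok : String) :
    (PySem.Dict.mk (kws.map (fun kw => (kw, lab)) ++ rest)).get? tok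
      = if kws.contains tok then some lab else (PySem.Dict.mk rest).get? tok := by
  induction kws with
  | nil => simp
  | cons kw kws ih =>
      by_cases h : kw = tok
      · subst h; simp [PySem.Dict.get?_mk_cons]
      · simp [PySem.Dict.get?_mk_cons, ih, h, Ne.symm h]

-- A's first-match scan equals first-match lookup in the flattened pair list
theorem firstMatch_eq_flat (tok : String) (ctx : List (Int × PySem.Set String)) :
    pvFirstMatch tok ctx = ((PySem.Dict.mk (pvFlat ctx)).get? tok).getD (-1) := by
  induction ctx with
  | nil => simp [pvFirstMatch, pvFlat, PySem.Dict.get?]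
  | cons p rest ih =>
      obtain ⟨lab, kws⟩ := p
      simp only [pvFirstMatch, pvFlat, List.flatMap_cons]
      rw [get?_mk_block]
      by_cases hm : tok ∈ kws
      · have hc : kws.contains tok = true := by simpa using hm
        simp [PySem.Set.contains, hm]
      · have hc : kws.contains tok = false := by simpa using hm
        simp [PySem.Set.contains, hm, ih, pvFlat]

-- a non-matching entry in the middle never affects lookup
theorem get?_mk_skip (l1 l2 : List (String × Int)) (k : String) (v : Int) (tok : String)
    (h : tok ≠ k) :
    (PySem.Dict.mk (l1 ++ (k, v) :: l2)).get? tok = (PySem.Dict.mk (l1 ++ l2)).get? tok := by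
  induction l1 with
  | nil => simp [PySem.Dict.get?_mk_cons, Ne.symm h]
  | cons p l1 ih =>
      obtain ⟨k', v'⟩ := p
      simp only [List.cons_append, PySem.Dict.get?_mk_cons]
      rw [ih]

-- if the key is matched inside the prefix, the tail is irrelevant
theorem get?_mk_hit (pre l l' : List (String × Int)) (tok : String)
    (h : tok ∈ pre.map Prod.fst) :
    (PySem.Dict.mk (pre ++ l)).get? tok = (PySem.Dict.mk (pre ++ l')).get? tok := by
  induction pre with
  | nil => simp at h
  | cons p pre ih =>
      obtain ⟨k', v'⟩ := p
      simp only [List.cons_append, PySem.Dict.get?_mk_cons]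
      by_cases hp : k' = tok
      · simp [hp]
      · simp only [List.map_cons, List.mem_cons] at h
        rcases h with h | h
        · exact absurd h.symm hp
        · simp [hp, ih h]

-- a later duplicate of a key already present earlier never affects lookup
theorem get?_mk_drop_dup (pre post : List (String × Int)) (k : String) (v : Int) (tok : String)
    (hk : k ∈ pre.map Prod.fst) :
    (PySem.Dict.mk (pre ++ (k, v) :: post)).get? tok = (PySem.Dict.mk (pre ++ post)).get? tok := by
  by_cases h : tok = k
  · exact get?_mk_hit pre _ _ tok (h ▸ hk)
  · exact get?_mk_skip pre post k v tok h

theorem pv_flatMap_singleton {α β : Type} (f : α → β) (l : List α) :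
    l.flatMap (fun x => [f x]) = l.map f := by
  induction l with
  | nil => rfl
  | cons x l ih => simp [ih]

-- ===== VERDICT (by name: the statement is the Claim_ definition above) =====
set_option maxRecDepth 16384 in
theorem label_sentence_Person_Group_spec : Claim_equal_label_sentence_Person_Group := by
  intro tokens _
  unfold Spec_label_sentence_Person_Group label_sentence_Person_Group label_sentence_Person_Group_alt
  rw [PySem.List.foldl_append_eq_flatMap]
  simp only [List.nil_append, pv_flatMap_singleton]
  refine congrArg (tokens.map ·) (funext fun token => ?_)
  set tok := PySem.Str.lower token with htok
  rw [firstMatch_eq_flat]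
  have hflat : pvFlat pvCtx =
      (pvFlat pvCtx).take 44 ++ ("koch", 33) :: (pvFlat pvCtx).drop 45 := by decide
  have hmem : "koch" ∈ ((pvFlat pvCtx).take 44).map Prod.fst := by decide
  have htbl : pvTable = PySem.Dict.mk ((pvFlat pvCtx).take 44 ++ (pvFlat pvCtx).drop 45) := by decide
  rw [hflat, get?_mk_drop_dup _ _ _ _ _ hmem, ← htbl, PySem.Dict.getD_eq_get?_getD]
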